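-- pv_equiv track=rewrite | github.com/Shevaitverma/30days_of_problem_solving- | Arrays/Basic/cont_sum_query.py | solve
-- ===== SOURCE A (Python) =====
-- def solve(a, b):
--     # created array with A zeros
--     arr = [0]*a
--     for query in b:
--         s = query[0]-1
--         e = query[1]-1
--         val = query[2]
--         arr[s] += val
--         if e+1 < len(arr):
--             arr[e+1] -= val
--     for i in range(1, a):
--         arr[i] += arr[i-1]
--
--     return arr
-- ===== SOURCE B (Python) =====
-- def solve(a, b):
--     # Apply each query directly: a range increment is the difference of two
--     # suffix increments (add val from the start on, take it back past the end).
--     arr = [0] * a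
--     for query in b:
--         s = query[0] - 1
--         e = query[1] - 1
--         val = query[2]
--         arr[s:] = [x + val for x in arr[s:]]
--         if e + 1 < a:
--             arr[e + 1:] = [x - val for x in arr[e + 1:]]
--     return arr
-- ===== Notes on version B (the rewrite author's own statement) =====
-- stated objective: alternative
-- what changed: Replaces the difference-array encoding plus prefix-sum sweep by applying each query directly: a range increment is performed as two slice-assignment suffix updates (add val to arr[s:], subtract it from arr[e+1:] when the range ends inside the array), so there is no difference array and no prefix pass.
import Mathlib
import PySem

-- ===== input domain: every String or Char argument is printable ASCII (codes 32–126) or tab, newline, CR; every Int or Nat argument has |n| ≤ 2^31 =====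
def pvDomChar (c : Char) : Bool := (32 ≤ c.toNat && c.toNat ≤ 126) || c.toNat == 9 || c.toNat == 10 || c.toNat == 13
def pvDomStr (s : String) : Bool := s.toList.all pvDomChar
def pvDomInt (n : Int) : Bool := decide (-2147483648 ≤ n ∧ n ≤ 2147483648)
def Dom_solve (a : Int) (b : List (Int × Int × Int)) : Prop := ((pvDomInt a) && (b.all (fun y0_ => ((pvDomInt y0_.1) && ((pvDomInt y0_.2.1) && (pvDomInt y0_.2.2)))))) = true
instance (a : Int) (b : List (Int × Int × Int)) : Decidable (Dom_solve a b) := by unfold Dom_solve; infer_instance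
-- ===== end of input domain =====

-- B applies each query directly as two slice-assignment suffix updates instead of
-- A's difference-array encoding plus prefix-sum sweep; same return value,
-- not faster (O(a*q) vs O(a+q)); neither implementation mutates its arguments.

-- ===== PORT A =====
def solve (a : Int) (b : List (Int × Int × Int)) : List Int :=
  let arr0 : List Int := List.replicate a.toNat 0          -- arr = [0]*a
  let arr1 : List Int := b.foldl (fun arr query =>
    let s := query.1 - 1
    let e := query.2.1 - 1
    let val := query.2.2
    let arr2 := PySem.List.pySetD arr s (PySem.List.pyGetD arr s 0 + val)   -- arr[s] += val
    if e + 1 < PySem.List.len arr2 then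
      PySem.List.pySetD arr2 (e + 1) (PySem.List.pyGetD arr2 (e + 1) 0 - val)  -- arr[e+1] -= val
    else arr2) arr0
  (PySem.List.pyRange 1 a 1).foldl (fun arr i =>
    PySem.List.pySetD arr i (PySem.List.pyGetD arr i 0 + PySem.List.pyGetD arr (i - 1) 0)) arr1

-- ===== PORT B =====
-- slice assignment arr[i:] = L is ported exactly as: the prefix before the clamped
-- start position is kept, the suffix from it is replaced by L
def solve_alt (a : Int) (b : List (Int × Int × Int)) : List Int :=
  b.foldl (fun arr query =>
    let s := query.1 - 1
    let e := query.2.1 - 1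
    let val := query.2.2
    -- arr[s:] = [x + val for x in arr[s:]]
    let arr1 := PySem.List.slice arr none (some s) ++
      (PySem.List.slice arr (some s) none).map (fun x => x + val)
    if e + 1 < a then
      -- arr[e+1:] = [x - val for x in arr[e+1:]]
      PySem.List.slice arr1 none (some (e + 1)) ++
        (PySem.List.slice arr1 (some (e + 1)) none).map (fun x => x - val)
    else arr1) (List.replicate a.toNat 0)

-- ===== PRECONDITION & SPEC =====
-- a query is in-bounds for A iff both cells it touches exist (Python negative
-- indices included); on any other query A raises IndexError
def inB (a : Int) (q : Int × Int × Int) : Prop :=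
  1 - a ≤ q.1 ∧ q.1 ≤ a ∧ (q.2.1 < a → -a ≤ q.2.1)

-- Pre_solve is exactly A's return domain: every query must address existing cells,
-- otherwise A raises IndexError (no input on which A returns is excluded)
def Pre_solve (a : Int) (b : List (Int × Int × Int)) : Prop := ∀ q ∈ b, inB a q

instance (a : Int) (b : List (Int × Int × Int)) : Decidable (Pre_solve a b) := by
  unfold Pre_solve inB; infer_instance

def pvWitness_solve : Int × (List (Int × Int × Int)) := (3, [(1, 2, 5), (2, 3, -1)])

def Spec_solve (a : Int) (b : List (Int × Int × Int)) (out : List Int) : Prop := out = solve_alt a b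
instance (a : Int) (b : List (Int × Int × Int)) (out : List Int) : Decidable (Spec_solve a b out) := by unfold Spec_solve; infer_instance

-- ===== CLAIM (what is proved, stated in full; the proofs are below) =====
def Claim_equal_solve : Prop := ∀ (a : Int) (b : List (Int × Int × Int)), Dom_solve a b → Pre_solve a b → Spec_solve a b (solve a b)

-- ===== LEMMAS AND PROOFS =====

-- Python indexing at a possibly negative in-range index, as plain List.set / List.getD
theorem pySetD_wrap (xs : List Int) (x v : Int) (h1 : -(xs.length : Int) ≤ x) (h2 : x < xs.length) :
    PySem.List.pySetD xs x v = xs.set (if x < 0 then x + xs.length else x).toNat v := by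
  simp only [PySem.List.pySetD, PySem.List.pySet?, PySem.List.pyIdx?]
  split_ifs with ha hb hc <;> simp_all
  · congr 1; omega
  · congr 1; omega

theorem pyGetD_wrap (xs : List Int) (x d : Int) (h1 : -(xs.length : Int) ≤ x) (h2 : x < xs.length) :
    PySem.List.pyGetD xs x d = xs.getD (if x < 0 then x + xs.length else x).toNat d := by
  simp only [PySem.List.pyGetD, PySem.List.pyGet?, PySem.List.pyIdx?]
  split_ifs with ha hb hc <;> simp_all
  · omega
  · have h : xs.length - (-x).toNat = (x + (xs.length : Int)).toNat := by omega
    rw [h]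

-- the wrapped (Python-normalised) position of index x in a list of length a
def wrapN (a x : Int) : Nat := (if x < 0 then x + a else x).toNat

-- contribution of one query to the difference array at cell j
def dC (a : Int) (q : Int × Int × Int) (j : Nat) : Int :=
  (if wrapN a (q.1 - 1) = j then q.2.2 else 0) +
  (if q.2.1 < a ∧ wrapN a q.2.1 = j then -q.2.2 else 0)

-- contribution of one query to the prefix-summed array at cell j
def pC (a : Int) (q : Int × Int × Int) (j : Nat) : Int :=
  (if wrapN a (q.1 - 1) ≤ j then q.2.2 else 0) +
  (if q.2.1 < a ∧ wrapN a q.2.1 ≤ j then -q.2.2 else 0)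

def dval (a : Int) (b : List (Int × Int × Int)) (j : Nat) : Int := (b.map (fun q => dC a q j)).sum
def pval (a : Int) (b : List (Int × Int × Int)) (j : Nat) : Int := (b.map (fun q => pC a q j)).sum

-- A's per-query loop body and prefix-pass body, named for the proofs
def Astep (arr : List Int) (query : Int × Int × Int) : List Int :=
  let s := query.1 - 1
  let e := query.2.1 - 1
  let val := query.2.2
  let arr2 := PySem.List.pySetD arr s (PySem.List.pyGetD arr s 0 + val)
  if e + 1 < PySem.List.len arr2 then
    PySem.List.pySetD arr2 (e + 1) (PySem.List.pyGetD arr2 (e + 1) 0 - val)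
  else arr2

def Gstep (arr : List Int) (i : Int) : List Int :=
  PySem.List.pySetD arr i (PySem.List.pyGetD arr i 0 + PySem.List.pyGetD arr (i - 1) 0)

theorem solve_unfold (a : Int) (b : List (Int × Int × Int)) :
    solve a b = (PySem.List.pyRange 1 a 1).foldl Gstep
      (b.foldl Astep (List.replicate a.toNat 0)) := rfl

-- B's per-query step, named for the proofs
def Bstep (a : Int) (arr : List Int) (query : Int × Int × Int) : List Int :=
  let s := query.1 - 1
  let e := query.2.1 - 1
  let val := query.2.2
  let arr1 := PySem.List.slice arr none (some s) ++
    (PySem.List.slice arr (some s) none).map (fun x => x + val)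
  if e + 1 < a then
    PySem.List.slice arr1 none (some (e + 1)) ++
      (PySem.List.slice arr1 (some (e + 1)) none).map (fun x => x - val)
  else arr1

theorem solve_alt_unfold (a : Int) (b : List (Int × Int × Int)) :
    solve_alt a b = b.foldl (Bstep a) (List.replicate a.toNat 0) := rfl

-- one suffix update, as plain take/drop/map at the wrapped position
theorem sufUpd_take_drop (arr : List Int) (i : Int) (f : Int → Int)
    (h1 : -(arr.length : Int) ≤ i) (h2 : i < (arr.length : Int)) :
    PySem.List.slice arr none (some i) ++ (PySem.List.slice arr (some i) none).map f =
      arr.take (wrapN arr.length i) ++ (arr.drop (wrapN arr.length i)).map f := by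
  by_cases hi : 0 ≤ i
  · have : i = ((i.toNat : Nat) : Int) := by omega
    rw [this, PySem.List.slice_to_natCast, PySem.List.slice_from_natCast]
    unfold wrapN
    rw [if_neg (by omega)]
    simp only [Int.toNat_natCast]
  · have hk : i = -(((-i).toNat : Nat) : Int) := by omega
    have hkpos : 0 < (-i).toNat := by omega
    rw [hk, PySem.List.slice_to_neg_natCast arr _ hkpos,
        PySem.List.slice_from_neg_natCast arr _ hkpos]
    have : arr.length - (-i).toNat = wrapN arr.length i := by unfold wrapN; split_ifs <;> omega
    rw [this, ← hk]

theorem tdm_len (arr : List Int) (k : Nat) (f : Int → Int) (hk : k ≤ arr.length) :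
    (arr.take k ++ (arr.drop k).map f).length = arr.length := by
  simp
  omega

theorem getD_tdm (arr : List Int) (k : Nat) (f : Int → Int) (j : Nat) (hj : j < arr.length) :
    (arr.take k ++ (arr.drop k).map f).getD j 0 =
      if k ≤ j then f (arr.getD j 0) else arr.getD j 0 := by
  rw [List.getD_eq_getElem?_getD]
  by_cases h : j < k
  · rw [List.getElem?_append_left (by simp; omega)]
    rw [if_neg (by omega)]
    rw [List.getElem?_take_of_lt h, List.getD_eq_getElem?_getD]
  · have hlen : (arr.take k).length = k := by simp; omega
    rw [List.getElem?_append_right (by omega), hlen]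
    rw [if_pos (by omega)]
    rw [List.getElem?_map, List.getElem?_drop]
    have : k + (j - k) = j := by omega
    rw [this, List.getD_eq_getElem?_getD]
    rw [List.getElem?_eq_getElem hj]
    rfl

theorem Bstep_len (a : Int) (ha : 1 ≤ a) (arr : List Int) (hlen : arr.length = a.toNat)
    (q : Int × Int × Int) (hq : inB a q) : (Bstep a arr q).length = arr.length := by
  obtain ⟨hq1, hq2, hq3⟩ := hq
  have hA : (arr.length : Int) = a := by omega
  have hw1 : wrapN arr.length (q.1 - 1) ≤ arr.length := by unfold wrapN; split_ifs <;> omega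
  simp only [Bstep]
  rw [sufUpd_take_drop arr _ _ (by omega) (by omega)]
  by_cases hc : q.2.1 - 1 + 1 < a
  · rw [if_pos hc]
    have h3 := hq3 (by omega)
    set arr1 := arr.take (wrapN arr.length (q.1 - 1)) ++
      (arr.drop (wrapN arr.length (q.1 - 1))).map (fun x => x + q.2.2) with harr1
    have hlen1 : arr1.length = arr.length := tdm_len arr _ _ hw1
    rw [sufUpd_take_drop arr1 _ _ (by rw [hlen1]; omega) (by rw [hlen1]; omega)]
    rw [tdm_len arr1 _ _ (by unfold wrapN; split_ifs <;> omega), hlen1]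
  · rw [if_neg hc]
    exact tdm_len arr _ _ hw1

theorem Bstep_getD (a : Int) (ha : 1 ≤ a) (arr : List Int) (hlen : arr.length = a.toNat)
    (q : Int × Int × Int) (hq : inB a q) (j : Nat) (hj : j < arr.length) :
    (Bstep a arr q).getD j 0 = arr.getD j 0 + pC a q j := by
  obtain ⟨hq1, hq2, hq3⟩ := hq
  have hA : (arr.length : Int) = a := by omega
  have hws : wrapN arr.length (q.1 - 1) = wrapN a (q.1 - 1) := by rw [hA]
  simp only [Bstep]
  rw [sufUpd_take_drop arr _ _ (by omega) (by omega), hws]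
  by_cases hc : q.2.1 - 1 + 1 < a
  · rw [if_pos hc]
    have h3 := hq3 (by omega)
    set arr1 := arr.take (wrapN a (q.1 - 1)) ++
      (arr.drop (wrapN a (q.1 - 1))).map (fun x => x + q.2.2) with harr1
    have hw1 : wrapN a (q.1 - 1) ≤ arr.length := by unfold wrapN; split_ifs <;> omega
    have hlen1 : arr1.length = arr.length := by rw [harr1, ← hws]; exact tdm_len arr _ _ (by omega)
    have hwe : wrapN arr1.length q.2.1 = wrapN a q.2.1 := by rw [hlen1, hA]
    rw [show (q.2.1 - 1 + 1) = q.2.1 from by ring]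
    rw [sufUpd_take_drop arr1 _ _ (by rw [hlen1]; omega) (by rw [hlen1]; omega), hwe]
    rw [getD_tdm arr1 _ _ j (by omega)]
    rw [harr1, ← hws, getD_tdm arr _ _ j hj, hws]
    unfold pC
    split_ifs <;> simp_all <;> ring
  · rw [if_neg hc]
    rw [← hws, getD_tdm arr _ _ j hj, hws]
    unfold pC
    rw [if_neg (show ¬(q.2.1 < a ∧ wrapN a q.2.1 ≤ j) from fun h => hc (by omega))]
    split_ifs <;> ring

theorem foldB_len (a : Int) (ha : 1 ≤ a) (b : List (Int × Int × Int)) (hb : ∀ q ∈ b, inB a q)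
    (arr : List Int) (hlen : arr.length = a.toNat) :
    (b.foldl (Bstep a) arr).length = arr.length := by
  induction b generalizing arr with
  | nil => rfl
  | cons q b ih =>
    have h1 := Bstep_len a ha arr hlen q (hb q (by simp))
    simp only [List.foldl_cons]
    rw [ih (fun r hr => hb r (by simp [hr])) _ (by rw [h1]; exact hlen), h1]

theorem foldB_getD (a : Int) (ha : 1 ≤ a) (b : List (Int × Int × Int)) (hb : ∀ q ∈ b, inB a q)
    (arr : List Int) (hlen : arr.length = a.toNat) (j : Nat) (hj : j < arr.length) :
    (b.foldl (Bstep a) arr).getD j 0 = arr.getD j 0 + pval a b j := by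
  induction b generalizing arr with
  | nil => simp [pval]
  | cons q b ih =>
    have h1 := Bstep_getD a ha arr hlen q (hb q (by simp)) j hj
    have hl := Bstep_len a ha arr hlen q (hb q (by simp))
    have h2 := ih (fun r hr => hb r (by simp [hr])) (Bstep a arr q)
      (by rw [hl]; exact hlen) (by rw [hl]; exact hj)
    simp only [List.foldl_cons]
    rw [h2, h1]
    simp only [pval, List.map_cons, List.sum_cons]
    ring

theorem getD_set (xs : List Int) (i : Nat) (v : Int) (j : Nat) :
    (xs.set i v).getD j 0 = if i = j ∧ j < xs.length then v else xs.getD j 0 := by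
  rw [List.getD_eq_getElem?_getD, List.getD_eq_getElem?_getD, List.getElem?_set]
  split_ifs <;> simp_all

theorem Astep_len (arr : List Int) (q : Int × Int × Int) : (Astep arr q).length = arr.length := by
  simp only [Astep]
  split_ifs <;> simp [PySem.List.length_pySetD]

theorem Astep_getD (a : Int) (ha : 1 ≤ a) (arr : List Int) (hlen : arr.length = a.toNat)
    (q : Int × Int × Int) (hq : inB a q) (j : Nat) (hj : j < arr.length) :
    (Astep arr q).getD j 0 = arr.getD j 0 + dC a q j := by
  obtain ⟨hq1, hq2, hq3⟩ := hq
  have hA : (arr.length : Int) = a := by omega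
  have hw0 : (if q.1 - 1 < 0 then q.1 - 1 + (arr.length : Int) else q.1 - 1).toNat = wrapN a (q.1 - 1) := by
    unfold wrapN; split_ifs <;> omega
  have hw0lt : wrapN a (q.1 - 1) < arr.length := by unfold wrapN; split_ifs <;> omega
  simp only [Astep]
  rw [pySetD_wrap arr _ _ (by omega) (by omega), pyGetD_wrap arr _ _ (by omega) (by omega), hw0]
  simp only [PySem.List.len_eq, List.length_set]
  by_cases hc : q.2.1 - 1 + 1 < (arr.length : Int)
  · rw [if_pos hc]
    have hc' : q.2.1 < a := by omega
    have h3 := hq3 hc'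
    have hw1 : (if q.2.1 - 1 + 1 < 0 then q.2.1 - 1 + 1 + ((arr.set (wrapN a (q.1 - 1)) (arr.getD (wrapN a (q.1 - 1)) 0 + q.2.2)).length : Int) else q.2.1 - 1 + 1).toNat = wrapN a q.2.1 := by
      simp only [List.length_set, hA]
      unfold wrapN; split_ifs <;> omega
    have hw1lt : wrapN a q.2.1 < arr.length := by unfold wrapN; split_ifs <;> omega
    rw [pySetD_wrap _ _ _ (by simp only [List.length_set]; omega) (by simp only [List.length_set]; omega),
        pyGetD_wrap _ _ _ (by simp only [List.length_set]; omega) (by simp only [List.length_set]; omega), hw1]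
    rw [getD_set, getD_set, getD_set]
    simp only [List.length_set]
    unfold dC
    split_ifs <;> simp_all
    all_goals omega
  · rw [if_neg hc]
    rw [getD_set]
    have hc' : ¬ (q.2.1 < a) := by omega
    unfold dC
    split_ifs <;> simp_all

theorem foldA_len (arr : List Int) (b : List (Int × Int × Int)) :
    (b.foldl Astep arr).length = arr.length := by
  induction b generalizing arr with
  | nil => rfl
  | cons q b ih => simpa [List.foldl_cons, Astep_len] using ih (Astep arr q)

theorem foldA_getD (a : Int) (ha : 1 ≤ a) (b : List (Int × Int × Int)) (hb : ∀ q ∈ b, inB a q)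
    (arr : List Int) (hlen : arr.length = a.toNat) (j : Nat) (hj : j < arr.length) :
    (b.foldl Astep arr).getD j 0 = arr.getD j 0 + dval a b j := by
  induction b generalizing arr with
  | nil => simp [dval]
  | cons q b ih =>
    have h1 := Astep_getD a ha arr hlen q (hb q (by simp)) j hj
    have h2 := ih (fun r hr => hb r (by simp [hr])) (Astep arr q)
      (by rw [Astep_len]; exact hlen) (by rw [Astep_len]; exact hj)
    simp only [List.foldl_cons]
    rw [h2, h1]
    simp only [dval, List.map_cons, List.sum_cons]
    ring

theorem prefix_pass (m : Nat) (arr : List Int) (h : 1 + (m : Int) ≤ (arr.length : Int)) :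
    ((PySem.List.pyRange 1 (1 + (m : Int)) 1).foldl Gstep arr).length = arr.length ∧
    ∀ j, j < arr.length →
      ((PySem.List.pyRange 1 (1 + (m : Int)) 1).foldl Gstep arr).getD j 0 =
        if j ≤ m then (arr.take (j + 1)).sum else arr.getD j 0 := by
  induction m with
  | zero =>
    rw [show ((0 : Nat) : Int) = 0 by rfl]
    rw [PySem.List.pyRange_one_eq_nil (by omega)]
    simp only [List.foldl_nil]
    refine ⟨by simp, ?_⟩
    intro j hj
    split_ifs with hj0
    · have hj0' : j = 0 := by omega
      subst hj0'
      rw [List.sum_take_succ _ _ (by omega), List.getD_eq_getElem _ _ hj]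
      simp
    · rfl
  | succ m ih =>
    have h' : 1 + (m : Int) ≤ (arr.length : Int) := by push_cast at h ⊢; omega
    obtain ⟨ihl, ihv⟩ := ih h'
    have hsplit : PySem.List.pyRange 1 (1 + ((m + 1 : Nat) : Int)) 1 =
        PySem.List.pyRange 1 (1 + (m : Int)) 1 ++ [1 + (m : Int)] := by
      have : (1 + ((m + 1 : Nat) : Int)) = (1 + (m : Int)) + 1 := by push_cast; ring
      rw [this, PySem.List.pyRange_one_succ_right (by omega)]
    rw [hsplit, List.foldl_append]
    set res := (PySem.List.pyRange 1 (1 + (m : Int)) 1).foldl Gstep arr with hres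
    simp only [List.foldl_cons, List.foldl_nil]
    have hmlt : m + 1 < arr.length := by omega
    have hresl : (res.length : Int) = (arr.length : Int) := by rw [ihl]
    unfold Gstep
    rw [pySetD_wrap res _ _ (by omega) (by omega),
        pyGetD_wrap res _ _ (by omega) (by omega),
        pyGetD_wrap res _ _ (by omega) (by omega)]
    rw [if_neg (by omega), if_neg (by omega)]
    have hidx1 : (1 + (m : Int)).toNat = m + 1 := by omega
    have hidx2 : (1 + (m : Int) - 1).toNat = m := by omega
    rw [hidx1, hidx2]
    have hv1 : res.getD (m + 1) 0 = arr.getD (m + 1) 0 := by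
      rw [ihv (m + 1) hmlt, if_neg (by omega)]
    have hv2 : res.getD m 0 = (arr.take (m + 1)).sum := by
      rw [ihv m (by omega), if_pos (by omega)]
    constructor
    · rw [List.length_set, ihl]
    · intro j hj
      rw [getD_set, ihl]
      by_cases hje : m + 1 = j
      · subst hje
        rw [if_pos ⟨rfl, hj⟩, if_pos (by omega), hv1, hv2,
            List.sum_take_succ _ _ hmlt, List.getD_eq_getElem _ _ hmlt]
        ring
      · rw [if_neg (by simp [hje]), ihv j hj]
        by_cases hjm : j ≤ m
        · rw [if_pos hjm, if_pos (by omega)]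
        · rw [if_neg hjm, if_neg (by omega)]

theorem pC_zero (a : Int) (q : Int × Int × Int) : pC a q 0 = dC a q 0 := by
  unfold pC dC
  simp

theorem pC_succ (a : Int) (q : Int × Int × Int) (j : Nat) :
    pC a q (j + 1) = pC a q j + dC a q (j + 1) := by
  unfold pC dC
  split_ifs <;> omega

theorem pval_zero (a : Int) (b : List (Int × Int × Int)) : pval a b 0 = dval a b 0 := by
  unfold pval dval
  simp [pC_zero]

theorem pval_succ (a : Int) (b : List (Int × Int × Int)) (j : Nat) :
    pval a b (j + 1) = pval a b j + dval a b (j + 1) := by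
  induction b with
  | nil => simp [pval, dval]
  | cons q b ih =>
    simp only [pval, dval, List.map_cons, List.sum_cons] at *
    rw [pC_succ]
    linarith

theorem take_sum_pval (a : Int) (b : List (Int × Int × Int)) (arr : List Int)
    (harr : ∀ j, j < arr.length → arr.getD j 0 = dval a b j) :
    ∀ j, j < arr.length → (arr.take (j + 1)).sum = pval a b j := by
  intro j
  induction j with
  | zero =>
    intro hj
    rw [List.sum_take_succ _ _ hj, pval_zero]
    have := harr 0 hj
    rw [List.getD_eq_getElem _ _ hj] at this
    simp [this]
  | succ j ih =>
    intro hj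
    rw [List.sum_take_succ _ _ hj, ih (by omega), pval_succ]
    have := harr (j + 1) hj
    rw [List.getD_eq_getElem _ _ hj] at this
    rw [this]

theorem Astep_nil (q : Int × Int × Int) : Astep [] q = [] := by
  simp only [Astep]
  have h : ∀ (x v : Int), PySem.List.pySetD ([] : List Int) x v = [] := by
    intro x v
    simp only [PySem.List.pySetD, PySem.List.pySet?, PySem.List.pyIdx?]
    split_ifs <;> simp_all
  rw [h]
  split_ifs <;> simp [h]

theorem solve_nil_of_nonpos (a : Int) (ha : a ≤ 0) (b : List (Int × Int × Int)) :
    solve a b = [] := by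
  rw [solve_unfold]
  have h0 : a.toNat = 0 := by omega
  rw [h0]
  have hfold : b.foldl Astep ([] : List Int) = [] := by
    induction b with
    | nil => rfl
    | cons q b ih => simp only [List.foldl_cons, Astep_nil]; exact ih
  simp only [List.replicate, hfold]
  rw [PySem.List.pyRange_one_eq_nil (by omega)]
  rfl

-- ===== VERDICT (by name: the statement is the Claim_ definition above) =====
theorem solve_spec : Claim_equal_solve := by
  unfold Claim_equal_solve
  intro a b _ hpre
  unfold Spec_solve
  by_cases ha : 1 ≤ a
  · have hb : ∀ q ∈ b, inB a q := hpre
    have hrep : (List.replicate a.toNat (0:Int)).length = a.toNat := by simp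
    have harr1len : (b.foldl Astep (List.replicate a.toNat (0:Int))).length = a.toNat := by
      rw [foldA_len]; simp
    have harr1 : ∀ j, j < a.toNat →
        (b.foldl Astep (List.replicate a.toNat (0:Int))).getD j 0 = dval a b j := by
      intro j hj
      rw [foldA_getD a ha b hb _ hrep j (by omega)]
      rw [List.getD_eq_getElem _ _ (by omega)]
      simp
    have hrange : (1 + (((a - 1).toNat : Nat) : Int)) = a := by omega
    obtain ⟨hAlen, hAval⟩ := prefix_pass (a - 1).toNat
      (b.foldl Astep (List.replicate a.toNat (0:Int))) (by rw [harr1len]; omega)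
    rw [hrange] at hAlen hAval
    have hBlen : (solve_alt a b).length = a.toNat := by
      rw [solve_alt_unfold, foldB_len a ha b hb _ hrep, hrep]
    have hBval : ∀ j, j < a.toNat → (solve_alt a b).getD j 0 = pval a b j := by
      intro j hj
      rw [solve_alt_unfold, foldB_getD a ha b hb _ hrep j (by omega)]
      rw [List.getD_eq_getElem _ _ (by omega)]
      simp
    apply List.ext_getElem
    · rw [solve_unfold, hAlen, harr1len, hBlen]
    · intro j hj1 hj2
      have hjn : j < a.toNat := by
        rw [solve_unfold, hAlen, harr1len] at hj1; exact hj1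
      rw [← List.getD_eq_getElem _ 0 hj1, ← List.getD_eq_getElem _ 0 hj2]
      rw [solve_unfold]
      rw [hAval j (by omega), if_pos (by omega)]
      rw [take_sum_pval a b _ (by intro k hk; exact harr1 k (by omega)) j (by omega)]
      exact (hBval j hjn).symm
  · rw [solve_nil_of_nonpos a (by omega) b]
    cases b with
    | nil =>
      rw [solve_alt_unfold]
      simp only [List.foldl_nil]
      rw [show a.toNat = 0 by omega]
      rfl
    | cons q rest =>
      exact absurd (hpre q (by simp)) (by unfold inB; omega)
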